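-- pv_equiv track=rewrite | github.com/kwaper/iti0102-2018 | pr14_exam/exam.py | add_or_subtract
-- ===== SOURCE A (Python) =====
-- def add_or_subtract(numbers):
--     """
--     Return the sum of all numbers in a list.
--
--     The sum is calculated according to following rules:
--         -always start by adding all the numbers together.
--         -if you find a 0, start subtracting all following numbers until you find another 0, then start adding again.
--         -there might be more than two 0 in a list - change +/- with every 0 you find.
--
--     For example:
--         [1, 2, 0, 3, 0, 4] -> 1 + 2 - 3 + 4 = 4
--         [0, 2, 1, 0, 1, 0, 2] -> -2 - 1 + 1 - 2 = -4
--         [1, 2] -> 1 + 2 = 3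
--         [4, 0, 2, 3] = 4 - 2 - 3 = -1
--
--     #2
--
--     :param numbers: the list of number given.
--     :return: the sum of all numbers.
--     """
--     sum = 0
--     zero = []
--     for i in numbers:
--         if i == 0:
--             zero.append(i)
--         if len(zero) % 2 == 0 or len(zero) == 0:
--             sum += i
--         if len(zero) % 2 != 0 and len(zero) != 0:
--             sum -= i
--     return sum
--     pass
-- ===== SOURCE B (Python) =====
-- def add_or_subtract(numbers):
--     # Phase 1: split into run sums separated by zeros (zeros themselves dropped;
--     # consecutive/boundary zeros give empty runs with sum 0).
--     sums = []
--     cur = 0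
--     for x in numbers:
--         if x == 0:
--             sums.append(cur)
--             cur = 0
--         else:
--             cur += x
--     sums.append(cur)
--     # Phase 2: alternate sign over the run sums.
--     total = 0
--     sign = 1
--     for s in sums:
--         total += sign * s
--         sign = -sign
--     return total
-- ===== Notes on version B (the rewrite author's own statement) =====
-- stated objective: alternative
-- what changed: B first collapses the list into per-run sums split at every zero, then folds those run sums with alternating sign, instead of A's single pass that keeps a growing list of seen zeros and tests its length's parity with two condition checks at every element.
import Mathlib
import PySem

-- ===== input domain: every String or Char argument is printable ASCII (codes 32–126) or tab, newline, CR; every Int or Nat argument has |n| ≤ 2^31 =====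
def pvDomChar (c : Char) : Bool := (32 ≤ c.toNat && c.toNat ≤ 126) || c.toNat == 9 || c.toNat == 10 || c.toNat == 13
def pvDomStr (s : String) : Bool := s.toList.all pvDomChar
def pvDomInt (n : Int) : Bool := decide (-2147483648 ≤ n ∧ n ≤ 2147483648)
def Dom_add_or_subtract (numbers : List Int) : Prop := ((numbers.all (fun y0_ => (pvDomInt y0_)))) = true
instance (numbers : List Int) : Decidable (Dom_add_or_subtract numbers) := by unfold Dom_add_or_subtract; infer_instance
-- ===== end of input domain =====

-- B: split the list at each zero into per-run sums, then fold those sums with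
-- alternating sign (alternative decomposition; same O(n) cost, return value only).
-- ===== PORT A =====
-- A's loop body: append i to the zero list if i == 0, then add or subtract i by the
-- parity of len(zero) (the two ifs kept in A's order).
def stepA (st : Int × List Int) (i : Int) : Int × List Int :=
  let zero := if i = 0 then st.2 ++ [i] else st.2
  let s1 := if zero.length % 2 = 0 ∨ zero.length = 0 then st.1 + i else st.1
  let s2 := if zero.length % 2 ≠ 0 ∧ zero.length ≠ 0 then s1 - i else s1
  (s2, zero)

def add_or_subtract (numbers : List Int) : Int :=
  (numbers.foldl stepA (0, [])).1

-- ===== PORT B =====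
-- B's phase-1 loop body: close the current run at a zero, otherwise accumulate.
def stepRuns (p : List Int × Int) (x : Int) : List Int × Int :=
  if x = 0 then (p.1 ++ [p.2], 0) else (p.1, p.2 + x)

-- B's phase-2 loop body: add with the current sign, flip the sign.
def stepAltSum (q : Int × Int) (s : Int) : Int × Int :=
  (q.1 + q.2 * s, -q.2)

def add_or_subtract_alt (numbers : List Int) : Int :=
  let p := numbers.foldl stepRuns ([], 0)
  let sums := p.1 ++ [p.2]
  (sums.foldl stepAltSum (0, 1)).1

-- ===== PRECONDITION & SPEC =====
def Spec_add_or_subtract (numbers : List Int) (out : Int) : Prop := out = add_or_subtract_alt numbers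
instance (numbers : List Int) (out : Int) : Decidable (Spec_add_or_subtract numbers out) := by unfold Spec_add_or_subtract; infer_instance

-- ===== CLAIM (what is proved, stated in full; the proofs are below) =====
def Claim_equal_add_or_subtract : Prop := ∀ (numbers : List Int), Dom_add_or_subtract numbers → Spec_add_or_subtract numbers (add_or_subtract numbers)

-- ===== LEMMAS AND PROOFS =====

-- Reference value: alternating-sign sum, sign flipping at each zero (sg = adding).
def pvF : List Int → Bool → Int
  | [], _ => 0
  | x :: xs, sg => if x = 0 then pvF xs (!sg) else (if sg then x else -x) + pvF xs sg

-- Alternating sum of a list of run sums.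
def pvAlt : List Int → Int
  | [] => 0
  | s :: r => s - pvAlt r

def pvSgn (n : Nat) : Int := if n % 2 = 0 then 1 else -1

theorem pvF_neg (xs : List Int) : pvF xs false = -pvF xs true := by
  induction xs with
  | nil => simp [pvF]
  | cons x xs ih =>
    by_cases hx : x = 0
    · simp only [pvF, if_pos hx, Bool.not_false, Bool.not_true]
      linarith
    · simp only [pvF, if_neg hx]
      norm_num
      linarith

theorem stepA_zero (s : Int) (z : List Int) : stepA (s, z) 0 = (s, z ++ [0]) := by
  unfold stepA
  split_ifs <;> simp_all

theorem stepA_nonzero (s : Int) (z : List Int) (x : Int) (hx : x ≠ 0) :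
    stepA (s, z) x = (if z.length % 2 = 0 then s + x else s - x, z) := by
  unfold stepA
  simp only [if_neg hx]
  split_ifs <;> first | rfl | omega

theorem stepRuns_zero (d : List Int) (c : Int) : stepRuns (d, c) 0 = (d ++ [c], 0) := by
  simp [stepRuns]

theorem stepRuns_nonzero (d : List Int) (c x : Int) (hx : x ≠ 0) :
    stepRuns (d, c) x = (d, c + x) := by
  simp [stepRuns, hx]

theorem pvAlt_append (d : List Int) (c : Int) :
    pvAlt (d ++ [c]) = pvAlt d + pvSgn d.length * c := by
  induction d with
  | nil => simp [pvAlt, pvSgn]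
  | cons s d ih =>
    simp only [List.cons_append, pvAlt, ih, List.length_cons, pvSgn]
    rcases Nat.even_or_odd d.length with h | h
    · have h0 : d.length % 2 = 0 := Nat.even_iff.mp h
      have h1 : (d.length + 1) % 2 = 1 := by omega
      simp only [h0, h1]
      norm_num; ring
    · have h0 : d.length % 2 = 1 := Nat.odd_iff.mp h
      have h1 : (d.length + 1) % 2 = 0 := by omega
      simp only [h0, h1]
      norm_num; ring

-- A's loop computes s plus pvF, with the sign given by the parity of the zero list.
theorem lemA (xs : List Int) : ∀ (s : Int) (z : List Int),
    (xs.foldl stepA (s, z)).1 =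
      s + (if z.length % 2 = 0 then pvF xs true else pvF xs false) := by
  induction xs with
  | nil => intro s z; simp [pvF]
  | cons x xs ih =>
    intro s z
    rw [List.foldl_cons]
    by_cases hx : x = 0
    · subst hx
      rw [stepA_zero, ih]
      have hF := pvF_neg xs
      simp only [pvF, Bool.not_true, List.length_append, List.length_cons,
        List.length_nil]
      rcases Nat.even_or_odd z.length with h | h
      · have h0 : z.length % 2 = 0 := Nat.even_iff.mp h
        have h1 : (z.length + 0 + 1) % 2 = 1 := by omega
        simp [h0, h1]
      · have h0 : z.length % 2 = 1 := Nat.odd_iff.mp h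
        have h1 : (z.length + 0 + 1) % 2 = 0 := by omega
        simp only [h0, h1]
        norm_num [hF]
    · rw [stepA_nonzero _ _ _ hx]
      rcases Nat.even_or_odd z.length with h | h
      · have h0 : z.length % 2 = 0 := Nat.even_iff.mp h
        rw [if_pos h0, ih]
        simp only [h0, pvF, if_neg hx, if_true]
        ring
      · have h0 : z.length % 2 = 1 := Nat.odd_iff.mp h
        rw [if_neg (by omega), ih]
        simp only [h0, pvF, if_neg hx]
        norm_num; ring

-- B's phase 2 computes the alternating sum of the run sums.
theorem lemAltSum (l : List Int) : ∀ (t sg : Int),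
    (l.foldl stepAltSum (t, sg)).1 = t + sg * pvAlt l := by
  induction l with
  | nil => intro t sg; simp [pvAlt]
  | cons s l ih =>
    intro t sg
    rw [List.foldl_cons]
    show (l.foldl stepAltSum (t + sg * s, -sg)).1 = _
    rw [ih]
    simp only [pvAlt]
    ring

-- B's phase 1 followed by the alternating sum equals pvF, signed by done's length.
theorem lemRuns (xs : List Int) : ∀ (done : List Int) (cur : Int),
    pvAlt ((xs.foldl stepRuns (done, cur)).1 ++ [(xs.foldl stepRuns (done, cur)).2]) =
      pvAlt (done ++ [cur]) + pvSgn done.length * pvF xs true := by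
  induction xs with
  | nil => intro done cur; simp [pvF]
  | cons x xs ih =>
    intro done cur
    rw [List.foldl_cons]
    by_cases hx : x = 0
    · subst hx
      rw [stepRuns_zero, ih, pvAlt_append (done ++ [cur]) 0]
      have hF := pvF_neg xs
      simp only [pvF, Bool.not_true, hF, List.length_append, List.length_cons,
        List.length_nil, pvSgn]
      rcases Nat.even_or_odd done.length with h | h
      · have h0 : done.length % 2 = 0 := Nat.even_iff.mp h
        have h1 : (done.length + 0 + 1) % 2 = 1 := by omega
        simp only [h0, h1]
        norm_num
      · have h0 : done.length % 2 = 1 := Nat.odd_iff.mp h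
        have h1 : (done.length + 0 + 1) % 2 = 0 := by omega
        simp only [h0, h1]
        norm_num
    · rw [stepRuns_nonzero _ _ _ hx, ih, pvAlt_append, pvAlt_append]
      simp only [pvF, if_neg hx, if_true]
      ring

-- ===== VERDICT (by name: the statement is the Claim_ definition above) =====
theorem add_or_subtract_spec : Claim_equal_add_or_subtract := by
  intro numbers _
  unfold Spec_add_or_subtract add_or_subtract add_or_subtract_alt
  rw [lemA numbers 0 [], lemAltSum, lemRuns numbers [] 0]
  simp [pvAlt, pvSgn]
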